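-- pv_equiv track=rewrite | github.com/vcth4nh/VCS | web02/bruteforce.py | bf_next_char
-- ===== SOURCE A (Python) =====
-- import string
--
-- ALLOWED_CHARACTERS = string.ascii_lowercase + string.digits
--
-- NUMBER_OF_CHARACTERS = len(ALLOWED_CHARACTERS)
--
-- def character_to_index(char):
--     return ALLOWED_CHARACTERS.index(char)
--
-- def index_to_character(index):
--     if NUMBER_OF_CHARACTERS <= index:
--         raise ValueError("Index out of range.")
--     else:
--         return ALLOWED_CHARACTERS[index]
--
-- def func_next_char(char):
--     cur_char_idx = character_to_index(char)
--     next_char = index_to_character((cur_char_idx + 1) % NUMBER_OF_CHARACTERS)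
--     return next_char
--
-- def bf_next_char(string):
--     change_pos = -1
--     string = list(string)
--     if len(string) <= 0:
--         string.append(index_to_character(0))
--     else:
--         next_char = func_next_char(string[change_pos])
--         if next_char == ALLOWED_CHARACTERS[0]:
--             while len(string) + change_pos >= 0:
--                 if string[change_pos] == ALLOWED_CHARACTERS[-1]:
--                     string[change_pos] = ALLOWED_CHARACTERS[0]
--                     change_pos -= 1
--                 else:
--                     string[change_pos] = func_next_char(string[change_pos])
--                     break
--             if len(string) + change_pos < 0:
--                 string.append(next_char)
--         else:
--             string[change_pos] = next_char
--     return ''.join(string)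
-- ===== SOURCE B (Python) =====
-- import string
--
-- ALLOWED_CHARACTERS = string.ascii_lowercase + string.digits
--
-- NUMBER_OF_CHARACTERS = len(ALLOWED_CHARACTERS)
--
-- def character_to_index(char):
--     return ALLOWED_CHARACTERS.index(char)
--
-- def index_to_character(index):
--     if NUMBER_OF_CHARACTERS <= index:
--         raise ValueError("Index out of range.")
--     else:
--         return ALLOWED_CHARACTERS[index]
--
-- def func_next_char(char):
--     cur_char_idx = character_to_index(char)
--     next_char = index_to_character((cur_char_idx + 1) % NUMBER_OF_CHARACTERS)
--     return next_char
--
-- def bf_next_char(string):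
--     stripped = string.rstrip('9')
--     if not stripped:
--         # empty input or all-nines overflow: one extra 'a'
--         return 'a' * (len(string) + 1)
--     return stripped[:-1] + func_next_char(stripped[-1]) + 'a' * (len(string) - len(stripped))
-- ===== Notes on version B (the rewrite author's own statement) =====
-- stated objective: simpler
-- what changed: Replaces A's in-place index-walking while loop with carry bookkeeping (change_pos, element assignment, conditional append) by a direct decomposition: rstrip the trailing nines, bump the pivot character, pad with copies of the first allowed character; the all-nines/empty case becomes one closed-form repetition of length len+1. The C-level rstrip/concat replaces A's per-character Python loop (constant-factor speedup, measured).
import Mathlib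
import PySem

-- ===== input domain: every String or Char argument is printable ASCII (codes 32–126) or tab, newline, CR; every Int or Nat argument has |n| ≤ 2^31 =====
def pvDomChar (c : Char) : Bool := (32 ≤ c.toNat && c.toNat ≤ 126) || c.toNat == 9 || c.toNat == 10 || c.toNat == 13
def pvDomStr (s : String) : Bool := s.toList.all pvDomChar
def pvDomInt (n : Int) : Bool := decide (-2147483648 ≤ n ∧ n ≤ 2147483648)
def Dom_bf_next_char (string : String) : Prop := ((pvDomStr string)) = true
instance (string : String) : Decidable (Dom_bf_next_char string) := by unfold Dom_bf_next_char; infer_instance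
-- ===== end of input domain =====

-- B replaces A's in-place index-walking carry loop by the rstrip('9')-and-pad decomposition (simpler); return values proved equal on Pre_.

-- ===== PORT A =====
-- ALLOWED_CHARACTERS = string.ascii_lowercase + string.digits
def pvAllowed : List Char := "abcdefghijklmnopqrstuvwxyz0123456789".toList

-- character_to_index: ALLOWED_CHARACTERS.index(char); none = ValueError
def pvCharToIndex? (c : Char) : Option Nat := PySem.List.index? pvAllowed c

-- index_to_character: raises (none) when NUMBER_OF_CHARACTERS <= index
def pvIndexToCharacter? (i : Nat) : Option Char :=
  if 36 ≤ i then none else PySem.List.pyGet? pvAllowed (i : Int)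

-- func_next_char
def pvFuncNextChar? (c : Char) : Option Char :=
  (pvCharToIndex? c).bind fun i => pvIndexToCharacter? ((i + 1) % 36)

-- the while loop of bf_next_char: state (string, change_pos); none = ValueError inside the loop
def pvLoopA (lst : List Char) (pos : Int) : Option (List Char × Int) :=
  if _h : 0 ≤ (lst.length : Int) + pos then
    match PySem.List.pyGet? lst pos with
    | some c =>
      if c = '9' then  -- string[change_pos] == ALLOWED_CHARACTERS[-1]
        pvLoopA (lst.set ((lst.length : Int) + pos).toNat 'a') (pos - 1)
      else
        match pvFuncNextChar? c with
        | some d => some (lst.set ((lst.length : Int) + pos).toNat d, pos)  -- then break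
        | none => none
    | none => none
  else some (lst, pos)
termination_by ((lst.length : Int) + pos + 1).toNat
decreasing_by simp only [List.length_set]; omega

def bf_next_char (string : String) : String :=
  let cs := string.toList
  let res : Option (List Char) :=
    if cs.length ≤ 0 then
      (pvIndexToCharacter? 0).map (fun c => cs ++ [c])
    else
      match (PySem.List.pyGet? cs (-1)).bind pvFuncNextChar? with
      | some nc =>
        if nc = 'a' then  -- next_char == ALLOWED_CHARACTERS[0]
          match pvLoopA cs (-1) with
          | some (lst, pos) =>
            if (lst.length : Int) + pos < 0 then some (lst ++ [nc]) else some lst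
          | none => none
        else some (cs.set ((cs.length : Int) + (-1)).toNat nc)  -- string[-1] = next_char
      | none => none
  match res with
  | some l => String.ofList l
  | none => ""  -- ValueError; excluded by Pre_

-- ===== PORT B =====
def bf_next_char_alt (string : String) : String :=
  let cs := string.toList
  -- string.rstrip('9') (hand-ported: drop trailing '9's)
  let stripped := (cs.reverse.dropWhile (· == '9')).reverse
  if stripped.isEmpty then
    String.ofList (List.replicate (cs.length + 1) 'a')  -- 'a' * (len(string) + 1)
  else
    match (PySem.List.pyGet? stripped (-1)).bind pvFuncNextChar? with
    | some d =>
      -- stripped[:-1] + func_next_char(stripped[-1]) + 'a' * (len(string) - len(stripped))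
      String.ofList (stripped.dropLast ++ d :: List.replicate (cs.length - stripped.length) 'a')
    | none => ""  -- ValueError from func_next_char; excluded by Pre_

-- ===== PRECONDITION & SPEC =====
-- Pre_ excludes exactly the inputs on which A raises ValueError: those whose last
-- non-'9' character (the pivot that gets incremented) is not in ALLOWED_CHARACTERS.
def Pre_bf_next_char (string : String) : Prop :=
  ((string.toList.reverse.dropWhile (· == '9')).head?.all fun c => pvAllowed.contains c) = true
instance (string : String) : Decidable (Pre_bf_next_char string) := by
  unfold Pre_bf_next_char; infer_instance

def pvWitness_bf_next_char : String := "ab9"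

def Spec_bf_next_char (string : String) (out : String) : Prop := out = bf_next_char_alt string
instance (string : String) (out : String) : Decidable (Spec_bf_next_char string out) := by
  unfold Spec_bf_next_char; infer_instance

-- ===== CLAIM (what is proved, stated in full; the proofs are below) =====
def Claim_equal_bf_next_char : Prop := ∀ (string : String), Dom_bf_next_char string → Pre_bf_next_char string → Spec_bf_next_char string (bf_next_char string)

-- ===== LEMMAS AND PROOFS =====

lemma pv_next_nine : pvFuncNextChar? '9' = some 'a' := by decide

-- for every allowed non-'9' character the successor exists and is not 'a'
set_option maxRecDepth 20000 in
lemma pv_next_ok_bool : pvAllowed.all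
    (fun c => (c == '9') || ((pvFuncNextChar? c).map (fun d => d != 'a')).getD false) = true := by
  decide

lemma pv_next_ok : ∀ c ∈ pvAllowed, c ≠ '9' →
    ((pvFuncNextChar? c).map (fun d => d != 'a')).getD false = true := by
  intro c hc h9
  have := List.all_eq_true.mp pv_next_ok_bool c hc
  simpa [h9] using this

-- the loop on an all-'9' tail with k already-carried 'a's behind it
lemma pv_loop_nines (j : Nat) : ∀ (k : Nat),
    pvLoopA (List.replicate j '9' ++ List.replicate k 'a') (-((k : Int) + 1)) =
      some (List.replicate (j + k) 'a', -((j : Int) + k + 1)) := by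
  induction j with
  | zero =>
    intro k
    rw [pvLoopA]
    rw [dif_neg (by simp)]
    refine Option.some_inj.mpr (Prod.ext ?_ ?_)
    · simp
    · push_cast; ring
  | succ j ih =>
    intro k
    rw [pvLoopA]
    rw [dif_pos (by simp only [List.length_append, List.length_replicate]; push_cast; omega)]
    have hlen : (List.replicate (j+1) '9' ++ List.replicate k 'a').length = j + 1 + k := by simp
    have hget : PySem.List.pyGet? (List.replicate (j+1) '9' ++ List.replicate k 'a') (-((k:Int)+1)) = some '9' := by
      rw [show (-((k:Int)+1)) = -(((k+1 : Nat) : Int)) by push_cast; ring]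
      rw [PySem.List.pyGet?_neg_natCast _ (k+1) (by omega) (by simp)]
      rw [hlen, show j+1+k-(k+1) = j by omega]
      rw [List.getElem?_append_left (by simp)]
      rw [List.getElem?_replicate]
      simp
    rw [hget]
    simp only [if_true]
    have hidx : (((List.replicate (j+1) '9' ++ List.replicate k 'a').length : Int) + -((k:Int)+1)).toNat = j := by
      simp [hlen]; omega
    rw [hidx]
    have hset : (List.replicate (j+1) '9' ++ List.replicate k 'a').set j 'a'
        = List.replicate j '9' ++ List.replicate (k+1) 'a' := by
      rw [List.replicate_succ' (n := j)]
      rw [List.append_assoc]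
      rw [List.set_append_right _ _ (by simp)]
      simp [List.replicate_succ]
    rw [hset]
    have hpos : (-((k:Int)+1) - 1) = -(((k+1:Nat):Int)+1) := by push_cast; ring
    rw [hpos, ih (k+1)]
    simp only [Option.some.injEq, Prod.mk.injEq]
    exact ⟨by rw [show j+(k+1)=j+1+k by omega], by push_cast; ring⟩

-- the loop when a pivot c ≠ '9' sits left of j nines and k carried 'a's
lemma pv_loop_pivot (j : Nat) : ∀ (u : List Char) (c : Char) (k : Nat) (d : Char),
    pvFuncNextChar? c = some d → c ≠ '9' →
    pvLoopA (u ++ c :: (List.replicate j '9' ++ List.replicate k 'a')) (-((k : Int) + 1)) =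
      some (u ++ d :: List.replicate (j + k) 'a', -((k : Int) + 1 + j)) := by
  induction j with
  | zero =>
    intro u c k d hd hc9
    rw [pvLoopA]
    rw [dif_pos (by simp; omega)]
    have hlen : (u ++ c :: (List.replicate 0 '9' ++ List.replicate k 'a')).length = u.length + 1 + k := by simp; omega
    have hget : PySem.List.pyGet? (u ++ c :: (List.replicate 0 '9' ++ List.replicate k 'a')) (-((k:Int)+1)) = some c := by
      rw [show (-((k:Int)+1)) = -(((k+1 : Nat) : Int)) by push_cast; ring]
      rw [PySem.List.pyGet?_neg_natCast _ (k+1) (by omega) (by simp)]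
      rw [hlen, show u.length+1+k-(k+1) = u.length by omega]
      rw [List.getElem?_append_right (by omega)]
      simp
    simp only [hget, if_neg hc9, hd]
    have hidx : (((u ++ c :: (List.replicate 0 '9' ++ List.replicate k 'a')).length : Int) + -((k:Int)+1)).toNat = u.length := by
      rw [hlen]; omega
    rw [hidx]
    rw [List.set_append_right _ _ (by omega)]
    simp only [Nat.sub_self, List.set_cons_zero]
    refine Option.some_inj.mpr (Prod.ext ?_ ?_)
    · simp
    · push_cast; ring
  | succ j ih =>
    intro u c k d hd hc9
    rw [pvLoopA]
    rw [dif_pos (by simp; omega)]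
    have hlen : (u ++ c :: (List.replicate (j+1) '9' ++ List.replicate k 'a')).length = u.length + 1 + (j+1) + k := by
      simp; omega
    have hget : PySem.List.pyGet? (u ++ c :: (List.replicate (j+1) '9' ++ List.replicate k 'a')) (-((k:Int)+1)) = some '9' := by
      rw [show (-((k:Int)+1)) = -(((k+1 : Nat) : Int)) by push_cast; ring]
      rw [PySem.List.pyGet?_neg_natCast _ (k+1) (by omega) (by simp; omega)]
      rw [hlen, show u.length+1+(j+1)+k-(k+1) = u.length + (j+1) by omega]
      rw [List.getElem?_append_right (by omega)]
      rw [show u.length + (j+1) - u.length = j+1 by omega]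
      rw [List.getElem?_cons_succ]
      rw [List.getElem?_append_left (by simp)]
      rw [List.getElem?_replicate]
      simp
    rw [hget]
    simp only [if_true]
    have hidx : (((u ++ c :: (List.replicate (j+1) '9' ++ List.replicate k 'a')).length : Int) + -((k:Int)+1)).toNat = u.length + (j+1) := by
      rw [hlen]; omega
    rw [hidx]
    have hset : (u ++ c :: (List.replicate (j+1) '9' ++ List.replicate k 'a')).set (u.length + (j+1)) 'a'
        = u ++ c :: (List.replicate j '9' ++ List.replicate (k+1) 'a') := by
      rw [List.set_append_right _ _ (by omega)]
      rw [show u.length + (j+1) - u.length = j+1 by omega]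
      rw [List.set_cons_succ]
      congr 1
      congr 1
      rw [List.replicate_succ' (n := j)]
      rw [List.append_assoc]
      rw [List.set_append_right _ _ (by simp)]
      simp [List.replicate_succ]
    rw [hset]
    rw [show (-((k:Int)+1) - 1) = -(((k+1:Nat):Int)+1) by push_cast; ring]
    rw [ih u c (k+1) d hd hc9]
    refine Option.some_inj.mpr (Prod.ext ?_ ?_)
    · simp only; rw [show j+(k+1) = (j+1)+k by omega]
    · push_cast; ring

lemma pv_decomp (cs : List Char) :
    cs = ((cs.reverse.dropWhile (· == '9')).reverse) ++
      List.replicate (cs.reverse.takeWhile (· == '9')).length '9' := by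
  have ht : cs.reverse.takeWhile (· == '9') =
      List.replicate (cs.reverse.takeWhile (· == '9')).length '9' := by
    apply List.eq_replicate_of_mem
    intro b hb
    have := List.mem_takeWhile_imp hb
    simpa using this
  conv_lhs => rw [← List.reverse_reverse cs,
    ← List.takeWhile_append_dropWhile (p := (· == '9')) (l := cs.reverse)]
  rw [List.reverse_append]
  congr 1
  conv_lhs => rw [ht]
  simp

lemma pv_dropWhile_head {l : List Char} {c : Char} {u : List Char}
    (h : l.dropWhile (· == '9') = c :: u) : c ≠ '9' := by
  have := List.head?_dropWhile_not (· == '9') l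
  rw [h] at this; simpa using this

-- ===== VERDICT (by name: the statement is the Claim_ definition above) =====
theorem bf_next_char_spec : Claim_equal_bf_next_char := by
  intro s _hdom hpre
  unfold Spec_bf_next_char bf_next_char bf_next_char_alt
  unfold Pre_bf_next_char at hpre
  generalize s.toList = cs at hpre ⊢
  simp only
  have hdec := pv_decomp cs
  cases hd : List.dropWhile (fun x => x == '9') cs.reverse with
  | nil =>
    rw [hd] at hdec
    simp only [List.reverse_nil, List.nil_append] at hdec
    generalize hJ : (List.takeWhile (fun x => x == '9') cs.reverse).length = j at hdec
    subst hdec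
    cases j with
    | zero => simp; decide
    | succ jj =>
      have hget : PySem.List.pyGet? (List.replicate (jj+1) '9') (-1) = some '9' := by
        rw [List.replicate_succ' (n := jj)]
        exact PySem.List.pyGet?_neg_one_append_singleton _ _
      have hloop := pv_loop_nines (jj+1) 0
      simp only [List.replicate_zero, List.append_nil, Nat.cast_zero, zero_add, Nat.add_zero,
        Nat.cast_add, Nat.cast_one] at hloop
      rw [if_neg (by simp)]
      rw [hget]
      simp only [Option.bind_some, pv_next_nine]
      simp only [if_true]
      rw [hloop]
      rw [if_pos (by simp)]
      simp [List.replicate_succ' (n := jj+1)]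
  | cons c u' =>
    rw [hd] at hdec hpre
    have hc9 : c ≠ '9' := pv_dropWhile_head hd
    have hc : c ∈ pvAllowed := by simpa using hpre
    have hok := pv_next_ok c hc hc9
    cases hnd : pvFuncNextChar? c with
    | none => rw [hnd] at hok; simp at hok
    | some d =>
      have hda : d ≠ 'a' := by rw [hnd] at hok; simpa using hok
      rw [List.reverse_cons] at hdec
      generalize hJ : (List.takeWhile (fun x => x == '9') cs.reverse).length = j at hdec
      subst hdec
      cases j with
      | zero =>
        simp only [List.replicate_zero, List.append_nil]
        rw [if_neg (by simp)]
        rw [PySem.List.pyGet?_neg_one_append_singleton]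
        simp only [Option.bind_some, hnd]
        rw [if_neg hda]
        rw [show (((u'.reverse ++ [c]).length : Int) + -1).toNat = u'.reverse.length by simp]
        rw [List.set_append_right _ _ (by omega)]
        simp only [Nat.sub_self, List.set_cons_zero]
        simp [hnd]
      | succ jj =>
        have hsplit : u'.reverse ++ [c] ++ List.replicate (jj+1) '9'
            = (u'.reverse ++ [c] ++ List.replicate jj '9') ++ ['9'] := by
          rw [List.replicate_succ' (n := jj)]
          simp [List.append_assoc]
        have hget : PySem.List.pyGet? (u'.reverse ++ [c] ++ List.replicate (jj+1) '9') (-1) = some '9' := by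
          rw [hsplit]
          exact PySem.List.pyGet?_neg_one_append_singleton _ _
        have hloop := pv_loop_pivot (jj+1) u'.reverse c 0 d hnd hc9
        simp only [List.replicate_zero, List.append_nil, Nat.cast_zero, zero_add, Nat.add_zero,
          Nat.cast_add, Nat.cast_one] at hloop
        rw [if_neg (by simp)]
        rw [hget]
        simp only [Option.bind_some, pv_next_nine]
        simp only [if_true]
        rw [show u'.reverse ++ [c] ++ List.replicate (jj+1) '9' = u'.reverse ++ c :: List.replicate (jj+1) '9' by simp]
        simp only [hloop]
        have hcond : ¬ (((u'.reverse ++ d :: List.replicate (jj + 1) 'a').length : Int) + -(1 + ((jj:Int) + 1)) < 0) := by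
          simp only [List.length_append, List.length_cons, List.length_replicate, List.length_reverse]
          push_cast; omega
        rw [if_neg hcond]
        simp only [List.reverse_cons]
        rw [if_neg (by simp)]
        rw [PySem.List.pyGet?_neg_one_append_singleton, Option.bind_some, hnd]
        rw [show (u'.reverse ++ c :: List.replicate (jj+1) '9').length - (u'.reverse ++ [c]).length = jj+1 by
          simp only [List.length_append, List.length_cons, List.length_replicate, List.length_reverse, List.length_nil]; omega]
        simp
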